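-- pv_equiv track=rewrite | github.com/horotat/curiosity | toolbox.py | imgn_per_x_objn
-- ===== SOURCE A (Python) =====
-- def imgn_per_x_objn(data_dict: dict, data_split: list) -> dict:  # fixme: It was a really really easy function. Just the description was terrible :)
--     """
--     Name: Image number per each X number of objects
--
--     I am sad to name it this way short. But no other way.
--     :param data_dict:
--     :type data_dict:
--     :param data_split:
--     :type data_split:
--     :return: :)
--     :rtype: dict
--     """
--     howmany_img_per_objnumber = {}  # new dictionary
--     for file in data_split:
--         if len(data_dict[file]) not in howmany_img_per_objnumber:
--             howmany_img_per_objnumber[len(data_dict[file])] = []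
--             howmany_img_per_objnumber[len(data_dict[file])].append(file)
--         else:
--             howmany_img_per_objnumber[len(data_dict[file])].append(file)
--     return howmany_img_per_objnumber
-- ===== SOURCE B (Python) =====
-- def imgn_per_x_objn(data_dict: dict, data_split: list) -> dict:
--     # Group files by len(data_dict[file]): compute all keys once, dedup them in
--     # first-occurrence order, then build each group with a single filter pass.
--     lens = [len(data_dict[f]) for f in data_split]
--     keys = list(dict.fromkeys(lens))
--     return {k: [f for f, l in zip(data_split, lens) if l == k] for k in keys}
-- ===== Notes on version B (the rewrite author's own statement) =====
-- stated objective: alternative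
-- what changed: Replaces the single-pass dict-append loop by a declarative decomposition: precompute the length keys, deduplicate them in first-occurrence order with dict.fromkeys, and build each group by filtering the zipped (file, length) list per key.
-- outside the precondition, e.g. on imgn_per_x_objn({}, ['a']): A raises KeyError, B raises KeyError
import Mathlib
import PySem

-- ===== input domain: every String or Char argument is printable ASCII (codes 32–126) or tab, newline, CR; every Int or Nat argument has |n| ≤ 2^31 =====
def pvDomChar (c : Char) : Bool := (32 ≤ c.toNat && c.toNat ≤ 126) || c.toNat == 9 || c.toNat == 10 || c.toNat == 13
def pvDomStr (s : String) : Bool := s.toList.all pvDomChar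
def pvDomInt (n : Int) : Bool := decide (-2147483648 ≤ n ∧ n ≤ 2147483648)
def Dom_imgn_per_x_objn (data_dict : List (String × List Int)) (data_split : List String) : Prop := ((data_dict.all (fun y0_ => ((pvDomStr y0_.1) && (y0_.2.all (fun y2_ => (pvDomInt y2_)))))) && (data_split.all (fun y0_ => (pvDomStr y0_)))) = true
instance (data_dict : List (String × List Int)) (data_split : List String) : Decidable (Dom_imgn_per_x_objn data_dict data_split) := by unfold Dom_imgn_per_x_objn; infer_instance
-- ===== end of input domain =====

-- B groups files by len(data_dict[file]) via dedup'd key list + one filter per key,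
-- instead of A's single-pass dict-append loop; same return value, objective: alternative.

-- the dict access len(data_dict[file]) (first-match association lookup; [] only outside Pre_)
def pvLen (data_dict : List (String × List Int)) (f : String) : Int :=
  (((data_dict.lookup f).getD []).length : Int)

-- ===== PORT A =====
def imgn_per_x_objn (data_dict : List (String × List Int)) (data_split : List String) : List (Int × List String) :=
  (data_split.foldl
    (fun (h : PySem.Dict Int (List String)) f =>
      let k := pvLen data_dict f
      if h.contains k = false then
        -- h[k] = []; h[k].append(f)
        let h1 := h.insert k []
        h1.insert k (h1.getD k [] ++ [f])
      else
        -- h[k].append(f)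
        h.insert k (h.getD k [] ++ [f]))
    PySem.Dict.empty).items

-- ===== PORT B =====
def imgn_per_x_objn_alt (data_dict : List (String × List Int)) (data_split : List String) : List (Int × List String) :=
  let lens := data_split.map (pvLen data_dict)
  let keys := PySem.List.dedup lens
  keys.map (fun k => (k, ((data_split.zip lens).filter (fun p => p.2 == k)).map (·.1)))

-- ===== PRECONDITION & SPEC =====
-- Pre_ excludes exactly the inputs where some file of data_split is not a key of
-- data_dict: there Python A (and B) raise KeyError.
def Pre_imgn_per_x_objn (data_dict : List (String × List Int)) (data_split : List String) : Prop :=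
  ∀ f ∈ data_split, f ∈ data_dict.map Prod.fst
instance (data_dict : List (String × List Int)) (data_split : List String) : Decidable (Pre_imgn_per_x_objn data_dict data_split) := by unfold Pre_imgn_per_x_objn; infer_instance

def pvWitness_imgn_per_x_objn : (List (String × List Int)) × List String :=
  ([("a", [1]), ("b", [1, 2])], ["a", "b", "a"])

def Spec_imgn_per_x_objn (data_dict : List (String × List Int)) (data_split : List String) (out : List (Int × List String)) : Prop := out = imgn_per_x_objn_alt data_dict data_split
instance (data_dict : List (String × List Int)) (data_split : List String) (out : List (Int × List String)) : Decidable (Spec_imgn_per_x_objn data_dict data_split out) := by unfold Spec_imgn_per_x_objn; infer_instance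

-- ===== CLAIM (what is proved, stated in full; the proofs are below) =====
def Claim_equal_imgn_per_x_objn : Prop := ∀ (data_dict : List (String × List Int)) (data_split : List String), Dom_imgn_per_x_objn data_dict data_split → Pre_imgn_per_x_objn data_dict data_split → Spec_imgn_per_x_objn data_dict data_split (imgn_per_x_objn data_dict data_split)

-- ===== LEMMAS AND PROOFS =====

-- A's loop body is exactly 'modify k [] (· ++ [f])': in the fresh-key branch the
-- inner getD reads the [] just inserted, in the other branch modify IS that insert.
theorem stepA_eq_modify (data_dict : List (String × List Int))
    (h : PySem.Dict Int (List String)) (f : String) :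
    (let k := pvLen data_dict f
     if h.contains k = false then
       let h1 := h.insert k []
       h1.insert k (h1.getD k [] ++ [f])
     else
       h.insert k (h.getD k [] ++ [f]))
    = h.modify (pvLen data_dict f) [] (· ++ [f]) := by
  set k := pvLen data_dict f with hk
  by_cases hc : h.contains k = false
  · simp only [hc, if_true]
    rw [PySem.Dict.insert_insert_self, PySem.Dict.getD_insert_self,
        show (h.modify k [] fun x => x ++ [f]) = h.insert k (h.getD k [] ++ [f]) from rfl,
        PySem.Dict.getD_of_not_contains h [] hc]
  · simp only [hc]
    rfl

-- the per-key group of B equals the filtered-pairs group the dict lemma produces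
theorem groups_eq (data_dict : List (String × List Int)) (data_split : List String) (k : Int) :
    ((data_split.map (fun f => (pvLen data_dict f, f))).filter (fun p => p.1 == k)).map (·.2)
    = ((data_split.zip (data_split.map (pvLen data_dict))).filter (fun p => p.2 == k)).map (·.1) := by
  induction data_split with
  | nil => rfl
  | cons f fs ih =>
    simp only [List.map_cons, List.zip_cons_cons, List.filter_cons]
    by_cases hp : pvLen data_dict f = k
    · simp [hp, ih]
    · simp [hp, ih]

-- ===== VERDICT (by name: the statement is the Claim_ definition above) =====
theorem imgn_per_x_objn_spec : Claim_equal_imgn_per_x_objn := by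
  intro data_dict data_split _ _
  unfold Spec_imgn_per_x_objn imgn_per_x_objn imgn_per_x_objn_alt
  -- rewrite A's loop body to modify
  have hfold :
      (data_split.foldl
        (fun (h : PySem.Dict Int (List String)) f =>
          let k := pvLen data_dict f
          if h.contains k = false then
            let h1 := h.insert k []
            h1.insert k (h1.getD k [] ++ [f])
          else
            h.insert k (h.getD k [] ++ [f]))
        PySem.Dict.empty)
      = ((data_split.map (fun f => (pvLen data_dict f, f))).foldl
          (fun (h : PySem.Dict Int (List String)) p => h.modify p.1 [] (· ++ [p.2]))
          PySem.Dict.empty) := by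
    rw [List.foldl_map]
    exact List.foldl_ext _ _ _ (fun h f _ => stepA_eq_modify data_dict h f)
  rw [hfold]
  set pairs := data_split.map (fun f => (pvLen data_dict f, f)) with hpairs
  set d := pairs.foldl
      (fun (h : PySem.Dict Int (List String)) p => h.modify p.1 [] (· ++ [p.2]))
      PySem.Dict.empty with hd
  have hnd : d.keys.Nodup := by
    rw [hd]
    exact PySem.Dict.nodup_keys_foldl_modify_key pairs Prod.fst []
      (fun h p => (· ++ [p.2])) PySem.Dict.empty PySem.Dict.nodup_keys_empty
  have hkeys : d.keys = PySem.List.dedup (data_split.map (pvLen data_dict)) := by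
    rw [hd, PySem.Dict.keys_foldl_modify_key, PySem.Dict.keys_empty, hpairs,
        List.map_map, PySem.List.dedup_eq_ofList]
    rfl
  rw [PySem.Dict.items_eq_map_keys d hnd [], hkeys]
  apply List.map_congr_left
  intro k _
  have hg : d.getD k [] = (pairs.filter (fun p => p.1 == k)).map (·.2) := by
    rw [hd, PySem.Dict.getD_foldl_modify_append, PySem.Dict.getD_empty, List.nil_append]
  rw [hg, hpairs, groups_eq]
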